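-- pv_equiv track=rewrite | github.com/Akashks2004/VIP-Threat-and-Monitoring | Final_Model.py | time_based_groups
-- ===== SOURCE A (Python) =====
-- def time_based_groups(posts, window_seconds=600):
--     posts_sorted = sorted(posts, key=lambda x: x["timestamp"])
--     clusters = []
--     current_cluster = [posts_sorted[0]]
--     for i in range(1, len(posts_sorted)):
--         if posts_sorted[i]["timestamp"] - posts_sorted[i-1]["timestamp"] <= window_seconds:
--             current_cluster.append(posts_sorted[i])
--         else:
--             if len(current_cluster) > 1:
--                 clusters.append(current_cluster)
--             current_cluster = [posts_sorted[i]]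
--     if len(current_cluster) > 1:
--         clusters.append(current_cluster)
--     return clusters
-- ===== SOURCE B (Python) =====
-- def _split(seq, window_seconds):
--     # recursively cut the sorted sequence at the FIRST gap > window_seconds
--     if not seq:
--         return []
--     k = 1
--     for prev, cur in zip(seq, seq[1:]):
--         if cur["timestamp"] - prev["timestamp"] > window_seconds:
--             break
--         k += 1
--     return [seq[:k]] + _split(seq[k:], window_seconds)
--
--
-- def time_based_groups(posts, window_seconds=600):
--     ps = sorted(posts, key=lambda x: x["timestamp"])
--     return [g for g in _split(ps, window_seconds) if len(g) > 1]
-- ===== Notes on version B (the rewrite author's own statement) =====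
-- stated objective: alternative
-- what changed: B replaces A's single accumulating loop (clusters + current_cluster flushed inline) with a recursive divide: repeatedly find the first gap exceeding the window in the sorted list, cut there, recurse on the remainder, then filter out singleton groups.
import Mathlib
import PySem

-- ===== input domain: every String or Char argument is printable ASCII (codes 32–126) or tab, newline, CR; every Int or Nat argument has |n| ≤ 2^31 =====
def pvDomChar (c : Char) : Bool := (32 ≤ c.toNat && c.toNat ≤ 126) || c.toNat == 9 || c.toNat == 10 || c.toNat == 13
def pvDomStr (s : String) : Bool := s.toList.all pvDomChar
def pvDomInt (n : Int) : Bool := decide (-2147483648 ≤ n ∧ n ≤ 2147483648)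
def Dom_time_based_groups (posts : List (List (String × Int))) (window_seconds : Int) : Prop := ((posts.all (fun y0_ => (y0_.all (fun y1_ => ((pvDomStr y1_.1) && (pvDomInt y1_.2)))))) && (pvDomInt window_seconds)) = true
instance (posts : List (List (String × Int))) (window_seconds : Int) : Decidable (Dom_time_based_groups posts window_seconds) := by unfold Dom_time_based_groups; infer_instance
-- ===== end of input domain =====

-- B replaces A's accumulating flush loop by recursive splitting at the first over-window gap;
-- equivalence of the RETURN VALUES is proved on nonempty posts whose every post has the
-- "timestamp" key (elsewhere Python A raises).

-- ===== PORT A =====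
-- p["timestamp"]: total form getD is exact under Pre_ (the key is present)
def pvTkey (p : List (String × Int)) : Int := PySem.Dict.getD ⟨p⟩ "timestamp" 0

-- A's for-loop over i = 1..len-1: prev is posts_sorted[i-1], cur is current_cluster, clusters the output so far
def pvALoop (w : Int) (clusters : List (List (List (String × Int)))) (cur : List (List (String × Int))) (prev : List (String × Int)) : List (List (String × Int)) → List (List (List (String × Int)))
  | [] => if cur.length > 1 then clusters ++ [cur] else clusters
  | p :: rest =>
      if pvTkey p - pvTkey prev ≤ w then pvALoop w clusters (cur ++ [p]) p rest
      else pvALoop w (if cur.length > 1 then clusters ++ [cur] else clusters) [p] p rest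

def time_based_groups (posts : List (List (String × Int))) (window_seconds : Int) : List (List (List (String × Int))) :=
  match PySem.List.sorted posts pvTkey with
  | [] => []  -- Python raises IndexError here (posts_sorted[0]); excluded by Pre_
  | p0 :: rest => pvALoop window_seconds [] [p0] p0 rest

-- ===== PORT B =====
-- B's for-loop over zip(seq, seq[1:]) (seq[1:] = tail): k counts the chain prefix, break at first over-window gap
def pvCutGo (w : Int) (k : Nat) : List ((List (String × Int)) × (List (String × Int))) → Nat
  | [] => k
  | (prev, cur) :: rest => if pvTkey cur - pvTkey prev > w then k else pvCutGo w (k + 1) rest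

-- termination helper for pvSplit (cited by its decreasing_by)
lemma pvCutGo_ge (w : Int) : ∀ (l : List ((List (String × Int)) × (List (String × Int)))) (k : Nat), k ≤ pvCutGo w k l := by
  intro l
  induction l with
  | nil => intro k; simp [pvCutGo]
  | cons pc rest ih =>
    intro k
    obtain ⟨prev, cur⟩ := pc
    simp only [pvCutGo]
    split
    · exact le_refl k
    · exact Nat.le_of_succ_le (ih (k + 1))

-- B's _split: seq[:k] / seq[k:] with 0 ≤ k are take/drop — exact here
def pvSplit (w : Int) (seq : List (List (String × Int))) : List (List (List (String × Int))) :=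
  if h : seq = [] then []
  else
    seq.take (pvCutGo w 1 (seq.zip seq.tail)) :: pvSplit w (seq.drop (pvCutGo w 1 (seq.zip seq.tail)))
termination_by seq.length
decreasing_by
  have h1 : 1 ≤ pvCutGo w 1 (seq.zip seq.tail) := pvCutGo_ge w _ 1
  cases seq with
  | nil => exact absurd rfl h
  | cons a l => simp only [List.length_drop, List.length_cons]; omega

def time_based_groups_alt (posts : List (List (String × Int))) (window_seconds : Int) : List (List (List (String × Int))) :=
  (pvSplit window_seconds (PySem.List.sorted posts pvTkey)).filter (fun g => decide (g.length > 1))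

-- ===== PRECONDITION & SPEC =====
-- Pre_ = exactly where Python A returns: posts nonempty (else IndexError) and every post
-- has the "timestamp" key (else KeyError inside the sort key).
def Pre_time_based_groups (posts : List (List (String × Int))) (window_seconds : Int) : Prop :=
  posts ≠ [] ∧ ∀ p ∈ posts, PySem.Dict.contains (⟨p⟩ : PySem.Dict String Int) "timestamp" = true
instance (posts : List (List (String × Int))) (window_seconds : Int) : Decidable (Pre_time_based_groups posts window_seconds) := by unfold Pre_time_based_groups; infer_instance

def pvWitness_time_based_groups : (List (List (String × Int))) × Int := ([[("timestamp", 0)], [("timestamp", 5)]], 600)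

def Spec_time_based_groups (posts : List (List (String × Int))) (window_seconds : Int) (out : List (List (List (String × Int)))) : Prop := out = time_based_groups_alt posts window_seconds
instance (posts : List (List (String × Int))) (window_seconds : Int) (out : List (List (List (String × Int)))) : Decidable (Spec_time_based_groups posts window_seconds out) := by unfold Spec_time_based_groups; infer_instance

-- ===== CLAIM (what is proved, stated in full; the proofs are below) =====
def Claim_equal_time_based_groups : Prop := ∀ (posts : List (List (String × Int))) (window_seconds : Int), Dom_time_based_groups posts window_seconds → Pre_time_based_groups posts window_seconds → Spec_time_based_groups posts window_seconds (time_based_groups posts window_seconds)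

-- ===== LEMMAS AND PROOFS =====

-- the greedy chunking both programs compute, as a common reference recursion
def pvChR (w : Int) (cur : List (List (String × Int))) : List (List (String × Int)) → List (List (List (String × Int)))
  | [] => [cur]
  | p :: rest =>
      if pvTkey p - pvTkey (cur.getLastD []) ≤ w then pvChR w (cur ++ [p]) rest
      else cur :: pvChR w [p] rest

-- within-window adjacency, and "all consecutive gaps within the window"
def pvR (w : Int) (a b : List (String × Int)) : Prop := pvTkey b - pvTkey a ≤ w

def pvChained (w : Int) : List (List (String × Int)) → Prop
  | [] => True
  | [_] => True
  | a :: b :: t => pvR w a b ∧ pvChained w (b :: t)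

lemma pvChained_snoc (w : Int) : ∀ (l : List (List (String × Int))) (p : List (String × Int)), l ≠ [] → pvChained w l → pvR w (l.getLastD []) p → pvChained w (l ++ [p]) := by
  intro l
  induction l with
  | nil => intro p h; exact absurd rfl h
  | cons a t ih =>
    intro p _ hc hr
    cases t with
    | nil => exact ⟨by simpa [List.getLastD] using hr, trivial⟩
    | cons b t' =>
      obtain ⟨hab, hrest⟩ := hc
      exact ⟨hab, ih p (by simp) hrest (by simpa [List.getLastD_cons] using hr)⟩

-- pvCutGo on a chained prefix cur followed by nothing or a broken gap returns k + |cur| - 1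
lemma pvCut_spec (w : Int) : ∀ (cur : List (List (String × Int))), cur ≠ [] → pvChained w cur →
    ∀ (rest : List (List (String × Int))) (k : Nat),
    (rest = [] ∨ ∃ p rest', rest = p :: rest' ∧ ¬ pvR w (cur.getLastD []) p) →
    pvCutGo w k (((cur ++ rest).zip (cur ++ rest).tail)) = k + cur.length - 1 := by
  intro cur
  induction cur with
  | nil => intro h; exact absurd rfl h
  | cons a t ih =>
    intro _ hch rest k hrest
    cases t with
    | nil =>
      rcases hrest with h0 | ⟨p, rest', rfl, hp⟩
      · subst h0; simp [pvCutGo]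
      · simp only [List.cons_append, List.nil_append]
        have hz : (a :: p :: rest').zip (a :: p :: rest').tail = (a, p) :: ((p :: rest').zip rest') := by
          simp [List.zip]
        rw [hz]
        simp only [pvCutGo]
        rw [if_pos (show pvTkey p - pvTkey a > w from lt_of_not_ge hp)]
        simp
    | cons b t' =>
      have hzip : ((a :: b :: t') ++ rest).zip (((a :: b :: t') ++ rest)).tail
          = (a, b) :: (((b :: t') ++ rest).zip (((b :: t') ++ rest)).tail) := by
        simp [List.zip]
      rw [hzip]
      simp only [pvCutGo]
      obtain ⟨hab, hrest'⟩ := hch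
      rw [if_neg (by simp only [pvR] at hab; omega)]
      have := ih (by simp) hrest' rest (k + 1)
        (by rcases hrest with h0 | ⟨p, rest', rfl, hp⟩
            · exact Or.inl h0
            · exact Or.inr ⟨p, rest', rfl, by simpa [List.getLastD_cons] using hp⟩)
      rw [this]
      simp only [List.length_cons]
      omega

-- pvSplit on a chained nonempty prefix cur followed by rest equals the greedy chunking
lemma pvSplit_eq (w : Int) : ∀ (rest cur : List (List (String × Int))), cur ≠ [] → pvChained w cur →
    pvSplit w (cur ++ rest) = pvChR w cur rest := by
  intro rest
  induction rest with
  | nil =>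
    intro cur hcur hch
    have hk := pvCut_spec w cur hcur hch [] 1 (Or.inl rfl)
    rw [pvSplit]
    rw [dif_neg (by simp [hcur])]
    simp only [List.append_nil] at hk ⊢
    rw [hk]
    have h1 : 1 ≤ cur.length := Nat.one_le_iff_ne_zero.mpr (by simpa using hcur)
    have htake : cur.take (1 + cur.length - 1) = cur := List.take_of_length_le (by omega)
    have hdrop : cur.drop (1 + cur.length - 1) = [] := List.drop_eq_nil_of_le (by omega)
    rw [htake, hdrop, pvSplit]
    simp [pvChR]
  | cons p rest ih =>
    intro cur hcur hch
    by_cases hgap : pvTkey p - pvTkey (cur.getLastD []) ≤ w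
    · have hch' : pvChained w (cur ++ [p]) := pvChained_snoc w cur p hcur hch hgap
      have := ih (cur ++ [p]) (by simp) hch'
      rw [List.append_assoc] at this
      simp only [List.singleton_append] at this
      rw [this]
      simp only [pvChR]
      rw [if_pos hgap]
    · have hk := pvCut_spec w cur hcur hch (p :: rest) 1 (Or.inr ⟨p, rest, rfl, hgap⟩)
      rw [pvSplit]
      rw [dif_neg (by simp [hcur])]
      rw [hk]
      have h1 : 1 ≤ cur.length := Nat.one_le_iff_ne_zero.mpr (by simpa using hcur)
      have hlen : 1 + cur.length - 1 = cur.length := by omega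
      rw [hlen, List.take_left, List.drop_left]
      have := ih [p] (by simp) trivial
      simp only [List.singleton_append] at this
      rw [this]
      simp only [pvChR]
      rw [if_neg hgap]

-- A's loop equals the greedy chunking with singletons dropped, appended to clusters
lemma pvALoop_eq (w : Int) : ∀ (rest cur : List (List (String × Int))) (clusters : List (List (List (String × Int)))), cur ≠ [] →
    pvALoop w clusters cur (cur.getLastD []) rest
      = clusters ++ (pvChR w cur rest).filter (fun g => decide (g.length > 1)) := by
  intro rest
  induction rest with
  | nil =>
    intro cur clusters hcur
    simp only [pvALoop, pvChR, List.filter]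
    by_cases h : cur.length > 1 <;> simp [h]
  | cons p rest ih =>
    intro cur clusters hcur
    simp only [pvALoop, pvChR]
    by_cases hgap : pvTkey p - pvTkey (cur.getLastD []) ≤ w
    · rw [if_pos hgap, if_pos hgap]
      have he : pvALoop w clusters (cur ++ [p]) p rest
          = pvALoop w clusters (cur ++ [p]) ((cur ++ [p]).getLastD []) rest := by
        rw [List.getLastD_concat]
      rw [he, ih (cur ++ [p]) clusters (by simp)]
    · rw [if_neg hgap, if_neg hgap]
      have he : pvALoop w (if cur.length > 1 then clusters ++ [cur] else clusters) [p] p rest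
          = pvALoop w (if cur.length > 1 then clusters ++ [cur] else clusters) [p] (([p] : List (List (String × Int))).getLastD []) rest := by
        simp [List.getLastD]
      rw [he, ih [p] _ (by simp)]
      simp only [List.filter]
      by_cases h : cur.length > 1 <;> simp [h]

-- ===== VERDICT (by name: the statement is the Claim_ definition above) =====
theorem time_based_groups_spec : Claim_equal_time_based_groups := by
  intro posts w _ hpre
  unfold Spec_time_based_groups time_based_groups time_based_groups_alt
  cases hs : PySem.List.sorted posts pvTkey with
  | nil => exact absurd ((PySem.List.sorted_eq_nil_iff posts pvTkey false).mp hs) hpre.1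
  | cons p0 rest =>
    show pvALoop w [] [p0] p0 rest = (pvSplit w (p0 :: rest)).filter (fun g => decide (g.length > 1))
    have hA := pvALoop_eq w rest [p0] [] (by simp)
    have e : ([p0] : List (List (String × Int))).getLastD [] = p0 := by simp [List.getLastD]
    rw [e] at hA
    rw [List.nil_append] at hA
    rw [hA]
    have hB := pvSplit_eq w rest [p0] (by simp) trivial
    simp only [List.singleton_append] at hB
    rw [hB]
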